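-- pv_equiv track=rewrite | github.com/nairanujit3/Reddit-User-Persona | utils/traits_tracker.py | map_citations
-- ===== SOURCE A (Python) =====
-- def map_citations(persona_text, posts, comments):
--     matched_quotes = []
--
--     all_content = posts + comments
--     for line in persona_text.splitlines():
--         for quote in all_content:
--             if quote[:50] in line:  # crude match for start of content
--                 matched_quotes.append((line.strip(), quote.strip()))
--
--     return matched_quotes
-- ===== SOURCE B (Python) =====
-- def map_citations(persona_text, posts, comments):
--     # Content-major traversal with per-line buckets; prefix/strip computed once per quote.
--     lines = persona_text.splitlines()
--     buckets = [[] for _ in lines]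
--     for quote in posts + comments:
--         prefix = quote[:50]
--         stripped = quote.strip()
--         for bucket, line in zip(buckets, lines):
--             if prefix in line:
--                 bucket.append(stripped)
--     return [(line.strip(), s)
--             for line, bucket in zip(lines, buckets)
--             for s in bucket]
-- ===== Notes on version B (the rewrite author's own statement) =====
-- stated objective: alternative
-- what changed: B traverses content-major, collecting each quote's matches into per-line buckets with the 50-char prefix and strip computed once per quote, then flattens the buckets in line order, instead of A's line-major nested loop that re-slices and re-strips every quote for every line.
import Mathlib
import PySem

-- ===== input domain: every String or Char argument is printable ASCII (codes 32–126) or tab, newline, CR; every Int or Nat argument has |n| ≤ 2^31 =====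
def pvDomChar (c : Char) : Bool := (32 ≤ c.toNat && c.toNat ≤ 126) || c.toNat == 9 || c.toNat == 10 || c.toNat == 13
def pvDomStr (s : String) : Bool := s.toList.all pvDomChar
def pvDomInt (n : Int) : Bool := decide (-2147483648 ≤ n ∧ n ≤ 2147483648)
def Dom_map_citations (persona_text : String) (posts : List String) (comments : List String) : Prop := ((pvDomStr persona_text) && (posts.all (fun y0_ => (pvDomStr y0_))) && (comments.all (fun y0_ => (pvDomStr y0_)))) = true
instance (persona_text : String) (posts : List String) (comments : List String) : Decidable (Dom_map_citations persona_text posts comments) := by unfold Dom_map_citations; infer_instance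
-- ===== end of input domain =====

-- B replaces A's line-major nested loop (which re-slices and re-strips every quote per line)
-- by a content-major pass over per-line buckets, computing each quote's prefix and strip once;
-- objective: alternative traversal of the same cost.

-- ===== PORT A =====
def map_citations (persona_text : String) (posts : List String) (comments : List String) : List (String × String) :=
  let all_content := posts ++ comments
  (PySem.Str.splitlines persona_text).foldl
    (fun acc line =>
      all_content.foldl
        (fun acc quote =>
          if PySem.Str.isIn (PySem.Str.slice quote none (some 50)) line then
            acc ++ [(PySem.Str.strip line, PySem.Str.strip quote)]
          else acc)
        acc)
    []

-- ===== PORT B =====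
def map_citations_alt (persona_text : String) (posts : List String) (comments : List String) : List (String × String) :=
  let lines := PySem.Str.splitlines persona_text
  let buckets0 : List (List String) := lines.map (fun _ => [])
  let buckets :=
    (posts ++ comments).foldl
      (fun bs quote =>
        let pre := PySem.Str.slice quote none (some 50)
        let stripped := PySem.Str.strip quote
        List.zipWith (fun b line => if PySem.Str.isIn pre line then b ++ [stripped] else b) bs lines)
      buckets0
  (List.zip lines buckets).flatMap (fun p => p.2.map (fun s => (PySem.Str.strip p.1, s)))

-- ===== PRECONDITION & SPEC =====
def Spec_map_citations (persona_text : String) (posts : List String) (comments : List String) (out : List (String × String)) : Prop := out = map_citations_alt persona_text posts comments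
instance (persona_text : String) (posts : List String) (comments : List String) (out : List (String × String)) : Decidable (Spec_map_citations persona_text posts comments out) := by unfold Spec_map_citations; infer_instance

-- ===== CLAIM (what is proved, stated in full; the proofs are below) =====
def Claim_equal_map_citations : Prop := ∀ (persona_text : String) (posts : List String) (comments : List String), Dom_map_citations persona_text posts comments → Spec_map_citations persona_text posts comments (map_citations persona_text posts comments)

-- ===== LEMMAS AND PROOFS =====

-- zipWith over a mapped left list against the list itself is a map
theorem pv_zipWith_map_self {α β : Type} (f : β → α → β) (g : α → β) (l : List α) :
    List.zipWith f (l.map g) l = l.map (fun x => f (g x) x) := by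
  induction l with
  | nil => rfl
  | cons x xs ih => simp [ih]

theorem pv_zip_map_self {α β : Type} (F : α → β) (l : List α) :
    List.zip l (l.map F) = l.map (fun x => (x, F x)) := by
  induction l with
  | nil => rfl
  | cons x xs ih => simp [ih]

-- B's bucket loop, characterised: starting from buckets lines.map g, after folding qs each
-- line's bucket has gained the strips of the quotes whose 50-char prefix occurs in the line.
theorem pv_buckets (qs lines : List String) (g : String → List String) :
    qs.foldl
      (fun bs quote =>
        List.zipWith (fun b line =>
          if PySem.Str.isIn (PySem.Str.slice quote none (some 50)) line then b ++ [PySem.Str.strip quote] else b)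
          bs lines)
      (lines.map g)
    = lines.map (fun line =>
        g line ++ (qs.filter (fun q => PySem.Str.isIn (PySem.Str.slice q none (some 50)) line)).map PySem.Str.strip) := by
  induction qs generalizing g with
  | nil => simp
  | cons q qs ih =>
    simp only [List.foldl_cons, pv_zipWith_map_self]
    rw [ih]
    congr 1
    funext line
    by_cases h : PySem.Chars.isIn (PySem.List.slice q.toList none (some 50)) line.toList <;>
      simp [h]

-- canonical form both programs compute
theorem pv_canon (persona_text : String) (posts comments : List String) :
    map_citations persona_text posts comments
    = (PySem.Str.splitlines persona_text).flatMap (fun line =>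
        ((posts ++ comments).filter (fun q => PySem.Str.isIn (PySem.Str.slice q none (some 50)) line)).map
          (fun q => (PySem.Str.strip line, PySem.Str.strip q))) := by
  unfold map_citations
  simp only [PySem.List.foldl_append_if, PySem.List.foldl_append_eq_flatMap, List.nil_append]

theorem pv_canon_alt (persona_text : String) (posts comments : List String) :
    map_citations_alt persona_text posts comments
    = (PySem.Str.splitlines persona_text).flatMap (fun line =>
        ((posts ++ comments).filter (fun q => PySem.Str.isIn (PySem.Str.slice q none (some 50)) line)).map
          (fun q => (PySem.Str.strip line, PySem.Str.strip q))) := by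
  unfold map_citations_alt
  simp only [pv_buckets, List.nil_append, pv_zip_map_self, List.flatMap_map, List.map_map]
  rfl

-- ===== VERDICT (by name: the statement is the Claim_ definition above) =====
theorem map_citations_spec : Claim_equal_map_citations := by
  intro persona_text posts comments _
  unfold Spec_map_citations
  rw [pv_canon, pv_canon_alt]
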